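-- pv_equiv track=rewrite | github.com/pyfca/pyfca | pyfca/implications.py | L
-- ===== SOURCE A (Python) =====
-- Lwidth = Hwidth = lambda n: 3**n
--
-- def L(g,i):
--     """recursively constructs L line for g; i = len(g)-1"""
--     g1 = g&(2**i)
--     if i:
--         n = Lwidth(i)
--         Ln = L(g,i-1)
--         if g1:
--             return Ln<<(2*n)           | Ln<<n | Ln
--         else:
--             return int('1'*n,2)<<(2*n) | Ln<<n | Ln
--     else:
--         if g1:
--             return int('000',2)
--         else:
--             return int('100',2)
-- ===== SOURCE B (Python) =====
-- def L(g, i):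
--     """iteratively constructs L line for g, level by level; i = len(g)-1"""
--     r = 0 if g & 1 else 4
--     for k in range(1, i + 1):
--         n = 3 ** k
--         low = (r << n) | r
--         if g & (1 << k):
--             r = (r << (2 * n)) | low
--         else:
--             r = (((1 << n) - 1) << (2 * n)) | low
--     return r
-- ===== Notes on version B (the rewrite author's own statement) =====
-- stated objective: alternative
-- what changed: Replaces the top-down recursion on i by a bottom-up iterative loop that accumulates the pattern level by level from the i=0 base case, using shifts and (1<<n)-1 instead of parsing a '1'*n binary string.
import Mathlib
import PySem

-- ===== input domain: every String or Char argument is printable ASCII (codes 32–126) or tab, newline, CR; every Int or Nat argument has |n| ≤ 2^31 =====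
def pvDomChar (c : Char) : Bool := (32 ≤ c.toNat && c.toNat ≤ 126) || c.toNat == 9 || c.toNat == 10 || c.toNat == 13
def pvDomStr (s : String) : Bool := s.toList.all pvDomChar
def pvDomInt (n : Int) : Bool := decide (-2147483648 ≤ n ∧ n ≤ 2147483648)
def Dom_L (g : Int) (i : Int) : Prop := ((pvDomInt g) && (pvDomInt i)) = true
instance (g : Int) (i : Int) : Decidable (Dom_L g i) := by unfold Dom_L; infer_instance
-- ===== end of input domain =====

-- B replaces A's top-down single-call recursion by a bottom-up iterative accumulation over levels 1..i (same cost, different decomposition); return values only.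

-- ===== PORT A =====
-- A recurses on i; for i < 0 the Python raises (2**i is a float, `g & float` is a
-- TypeError), so the recursion is transcribed on the Nat depth i.toNat (Pre_L below
-- admits exactly i ≥ 0).
def LgoA (g : Int) : Nat → Int
  | 0 =>
    let g1 := g.land ((2:Int) ^ (0:Nat))      -- g & (2**0)
    if g1 != 0 then (0:Int)                   -- int('000',2) = 0 (exact)
    else (4:Int)                              -- int('100',2) = 4 (exact)
  | k+1 =>
    let g1 := g.land ((2:Int) ^ (k+1))        -- g & (2**i)
    let n : Nat := 3 ^ (k+1)                  -- Lwidth(i) = 3**i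
    let Ln := LgoA g k                        -- L(g, i-1)
    if g1 != 0 then
      ((Ln.shiftLeft (2*n)).lor (Ln.shiftLeft n)).lor Ln
    else
      -- int('1'*n, 2) = 2^n - 1 (exact for n ≥ 1)
      ((((2:Int) ^ n - 1).shiftLeft (2*n)).lor (Ln.shiftLeft n)).lor Ln

def L (g : Int) (i : Int) : Int := LgoA g i.toNat

-- ===== PORT B =====
-- Source B: r = 0 if g&1 else 4; for k in range(1, i+1): combine level k; return r.
-- range(1, i+1) is List.range' 1 i.toNat (empty when i ≤ 0).
def L_alt (g : Int) (i : Int) : Int :=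
  let r0 : Int := if g.land 1 != 0 then 0 else 4
  (List.range' 1 i.toNat).foldl (fun r k =>
    let n : Nat := 3 ^ k
    let low := (r.shiftLeft n).lor r
    if g.land ((1:Int).shiftLeft k) != 0 then
      (r.shiftLeft (2*n)).lor low
    else
      (((1:Int).shiftLeft n - 1).shiftLeft (2*n)).lor low) r0

-- ===== PRECONDITION & SPEC =====
-- Pre_L: for i < 0 the Python A raises TypeError (g & (2**i) mixes int and float);
-- it returns normally exactly when i ≥ 0.
def Pre_L (g : Int) (i : Int) : Prop := 0 ≤ i
instance (g : Int) (i : Int) : Decidable (Pre_L g i) := by unfold Pre_L; infer_instance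
def pvWitness_L : Int × Int := (5, 2)

def Spec_L (g : Int) (i : Int) (out : Int) : Prop := out = L_alt g i
instance (g : Int) (i : Int) (out : Int) : Decidable (Spec_L g i out) := by unfold Spec_L; infer_instance

-- ===== CLAIM (what is proved, stated in full; the proofs are below) =====
def Claim_equal_L : Prop := ∀ (g : Int) (i : Int), Dom_L g i → Pre_L g i → Spec_L g i (L g i)

-- ===== LEMMAS AND PROOFS =====

theorem pvLor_ofNat (m n : Nat) : ((m:Int)).lor (n:Int) = ((m ||| n : Nat) : Int) := rfl

theorem pvShift_ofNat (m k : Nat) : ((m:Int)).shiftLeft k = ((m <<< k : Nat) : Int) := rfl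

theorem pvLor_nonneg {a b : Int} (ha : 0 ≤ a) (hb : 0 ≤ b) : 0 ≤ a.lor b := by
  obtain ⟨m, rfl⟩ := Int.eq_ofNat_of_zero_le ha
  obtain ⟨n, rfl⟩ := Int.eq_ofNat_of_zero_le hb
  rw [pvLor_ofNat]
  exact Int.natCast_nonneg _

theorem pvShift_nonneg {a : Int} (k : Nat) (ha : 0 ≤ a) : 0 ≤ a.shiftLeft k := by
  obtain ⟨m, rfl⟩ := Int.eq_ofNat_of_zero_le ha
  rw [pvShift_ofNat]
  exact Int.natCast_nonneg _

theorem pvLor_assoc {a b c : Int} (ha : 0 ≤ a) (hb : 0 ≤ b) (hc : 0 ≤ c) :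
    (a.lor b).lor c = a.lor (b.lor c) := by
  obtain ⟨m, rfl⟩ := Int.eq_ofNat_of_zero_le ha
  obtain ⟨n, rfl⟩ := Int.eq_ofNat_of_zero_le hb
  obtain ⟨p, rfl⟩ := Int.eq_ofNat_of_zero_le hc
  simp only [pvLor_ofNat]
  rw [Nat.lor_assoc]

theorem pvOne_shiftLeft (k : Nat) : (1:Int).shiftLeft k = 2 ^ k := by
  show Int.ofNat (1 <<< k) = _
  rw [Nat.one_shiftLeft]
  exact_mod_cast rfl

theorem pvLgoA_nonneg (g : Int) (k : Nat) : 0 ≤ LgoA g k := by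
  induction k with
  | zero =>
    simp only [LgoA]
    split <;> norm_num
  | succ k ih =>
    simp only [LgoA]
    split
    · exact pvLor_nonneg (pvLor_nonneg (pvShift_nonneg _ ih) (pvShift_nonneg _ ih)) ih
    · refine pvLor_nonneg (pvLor_nonneg (pvShift_nonneg _ ?_) (pvShift_nonneg _ ih)) ih
      have : (0:Int) < 2 ^ (3 ^ (k+1)) := by positivity
      omega

-- B's base value equals A's level-0 value.
theorem pvBase_eq (g : Int) :
    (if g.land 1 != 0 then (0:Int) else 4) = LgoA g 0 := by
  simp only [LgoA, pow_zero]

-- one step of B's loop, applied to A's level-k value, produces A's level-(k+1) value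
theorem pvStep_eq (g : Int) (k : Nat) :
    (fun (r : Int) (k : Nat) =>
      let n : Nat := 3 ^ k
      let low := (r.shiftLeft n).lor r
      if g.land ((1:Int).shiftLeft k) != 0 then
        (r.shiftLeft (2*n)).lor low
      else
        (((1:Int).shiftLeft n - 1).shiftLeft (2*n)).lor low) (LgoA g k) (k+1)
    = LgoA g (k+1) := by
  have hLn := pvLgoA_nonneg g k
  simp only [LgoA, pvOne_shiftLeft]
  split
  · exact (pvLor_assoc (pvShift_nonneg _ hLn) (pvShift_nonneg _ hLn) hLn).symm
  · refine (pvLor_assoc ?_ (pvShift_nonneg _ hLn) hLn).symm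
    refine pvShift_nonneg _ ?_
    have : (0:Int) < 2 ^ (3 ^ (k+1)) := by positivity
    omega

theorem pvFold_eq (g : Int) (m : Nat) :
    (List.range' 1 m).foldl (fun (r : Int) (k : Nat) =>
      let n : Nat := 3 ^ k
      let low := (r.shiftLeft n).lor r
      if g.land ((1:Int).shiftLeft k) != 0 then
        (r.shiftLeft (2*n)).lor low
      else
        (((1:Int).shiftLeft n - 1).shiftLeft (2*n)).lor low)
      (if g.land 1 != 0 then (0:Int) else 4) = LgoA g m := by
  induction m with
  | zero => simpa using pvBase_eq g
  | succ m ih =>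
    rw [List.range'_concat, List.foldl_append, List.foldl_cons, List.foldl_nil, ih]
    have h : 1 + 1 * m = m + 1 := by omega
    rw [h]
    exact pvStep_eq g m

-- ===== VERDICT (by name: the statement is the Claim_ definition above) =====
theorem L_spec : Claim_equal_L := by
  intro g i _ _
  unfold Spec_L L L_alt
  exact (pvFold_eq g i.toNat).symm
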